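-- pv_equiv track=rewrite | github.com/FoxRav/kuntaparse | src/text_cleanup.py | remove_duplicate_sections
-- ===== SOURCE A (Python) =====
-- def remove_duplicate_sections(text: str) -> str:
--     """
--     Remove obvious duplicate sections (same paragraph appearing twice).
--     """
--     lines = text.split('\n')
--     seen_paragraphs: set[str] = set()
--     result_lines: list[str] = []
--
--     current_paragraph: list[str] = []
--
--     for line in lines:
--         stripped = line.strip()
--
--         # Empty line = end of paragraph
--         if not stripped:
--             if current_paragraph:
--                 paragraph_text = '\n'.join(current_paragraph)
--                 # Only add if not seen before (and long enough to be meaningful)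
--                 if len(paragraph_text) < 100 or paragraph_text not in seen_paragraphs:
--                     result_lines.extend(current_paragraph)
--                     seen_paragraphs.add(paragraph_text)
--                 current_paragraph = []
--             result_lines.append(line)
--         else:
--             current_paragraph.append(line)
--
--     # Don't forget last paragraph
--     if current_paragraph:
--         paragraph_text = '\n'.join(current_paragraph)
--         if len(paragraph_text) < 100 or paragraph_text not in seen_paragraphs:
--             result_lines.extend(current_paragraph)
--
--     return '\n'.join(result_lines)
-- ===== SOURCE B (Python) =====
-- def remove_duplicate_sections(text: str) -> str:
--     """
--     Remove obvious duplicate sections (same paragraph appearing twice).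
--     """
--     lines = text.split('\n')
--     # pass 1: give every non-blank line a paragraph id (blank lines get None)
--     labels: list = []
--     pid = -1
--     prev = False
--     for line in lines:
--         cur = bool(line.strip())
--         if cur and not prev:
--             pid += 1
--         labels.append(pid if cur else None)
--         prev = cur
--     # pass 2: paragraph texts, indexed by id
--     paras: list[str] = []
--     for line, lab in zip(lines, labels):
--         if lab is None:
--             continue
--         if lab == len(paras):
--             paras.append(line)
--         else:
--             paras[-1] = paras[-1] + '\n' + line
--     # pass 3: ids of paragraphs to drop: long and already occurred earlier
--     dropped = {i for i, t in enumerate(paras) if len(t) >= 100 and t in paras[:i]}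
--     # pass 4: keep every line whose paragraph is not dropped
--     return '\n'.join(l for l, lab in zip(lines, labels) if lab not in dropped)
-- ===== Notes on version B (the rewrite author's own statement) =====
-- stated objective: alternative
-- what changed: A's single line-at-a-time loop threading a seen-set and a pending-paragraph buffer is replaced by four staged passes: label every line with a paragraph id, build the paragraph table, compute the set of dropped ids from the table alone (a paragraph is dropped iff it is >=100 chars and its text occurs among earlier paragraphs), then filter the original lines by id.
import Mathlib
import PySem

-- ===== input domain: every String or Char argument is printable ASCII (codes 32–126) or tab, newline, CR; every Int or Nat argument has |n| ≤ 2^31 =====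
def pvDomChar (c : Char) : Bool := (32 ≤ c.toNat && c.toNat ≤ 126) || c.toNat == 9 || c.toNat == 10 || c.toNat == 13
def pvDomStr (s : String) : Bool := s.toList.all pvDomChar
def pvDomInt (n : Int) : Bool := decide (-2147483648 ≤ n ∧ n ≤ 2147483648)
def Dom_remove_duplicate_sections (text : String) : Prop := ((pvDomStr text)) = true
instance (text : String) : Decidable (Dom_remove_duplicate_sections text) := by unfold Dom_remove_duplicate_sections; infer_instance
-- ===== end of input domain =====

-- B replaces A's one-pass seen-set accumulator loop by four staged passes: label each line
-- with a paragraph id, build the paragraph table, compute the set of dropped ids from the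
-- table alone, then filter the original lines (objective: alternative, same cost).

-- ===== PORT A =====

-- the emission condition 'len(p) < 100 or p not in seen' of A
def pvCond (seen : PySem.Set String) (p : String) : Bool :=
  PySem.Str.len p < 100 || !(PySem.Set.contains seen p)

-- A's loop body: state = (seen_paragraphs, result_lines, current_paragraph)
def pvAStep (st : PySem.Set String × List String × List String) (line : String) :
    PySem.Set String × List String × List String :=
  let seen := st.1
  let result := st.2.1
  let cur := st.2.2
  if PySem.Str.strip line == "" then
    if cur.isEmpty then (seen, result ++ [line], [])
    else
      let p := PySem.Str.join "\n" cur
      if pvCond seen p then (PySem.Set.add seen p, (result ++ cur) ++ [line], [])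
      else (seen, result ++ [line], [])
  else (seen, result, cur ++ [line])

def remove_duplicate_sections (text : String) : String :=
  let lines := (PySem.Str.split? text "\n").getD []
  let st := lines.foldl pvAStep (PySem.Set.empty, [], [])
  let result :=
    if st.2.2.isEmpty then st.2.1
    else if pvCond st.1 (PySem.Str.join "\n" st.2.2) then st.2.1 ++ st.2.2
    else st.2.1
  PySem.Str.join "\n" result

-- ===== PORT B =====

-- Source B's 'bool(line.strip())'
def pvKey (l : String) : Bool := !(PySem.Str.strip l == "")

-- pass 1 body: state = (labels, pid, prev)
def pvLab (st : List (Option Int) × Int × Bool) (line : String) :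
    List (Option Int) × Int × Bool :=
  let cur := pvKey line
  let pid := if cur && !st.2.2 then st.2.1 + 1 else st.2.1
  (st.1 ++ [if cur then some pid else none], pid, cur)

-- pass 2 body: build the paragraph texts, indexed by id
def pvPara (paras : List String) (p : String × Option Int) : List String :=
  match p.2 with
  | none => paras
  | some lab =>
    if lab == PySem.List.len paras then paras ++ [p.1]
    else PySem.List.pySetD paras (-1) (PySem.List.pyGetD paras (-1) "" ++ "\n" ++ p.1)

-- pass 3: the set comprehension of dropped paragraph ids
def pvDropped (paras : List String) : PySem.Set Int :=
  PySem.Set.ofList (((PySem.List.enumerate paras).filter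
      (fun it => decide (100 ≤ PySem.Str.len it.2) &&
        decide (it.2 ∈ PySem.List.slice paras none (some it.1)))).map (·.1))

-- pass 4 filter: 'lab not in dropped' (None is never in a set of ints)
def pvKeep (dropped : PySem.Set Int) (p : String × Option Int) : Bool :=
  match p.2 with
  | none => true
  | some i => !(PySem.Set.contains dropped i)

def remove_duplicate_sections_alt (text : String) : String :=
  let lines := (PySem.Str.split? text "\n").getD []
  let labels := (lines.foldl pvLab ([], -1, false)).1
  let paras := (lines.zip labels).foldl pvPara []
  let dropped := pvDropped paras
  PySem.Str.join "\n" (((lines.zip labels).filter (pvKeep dropped)).map (·.1))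

-- ===== PRECONDITION & SPEC =====
def Spec_remove_duplicate_sections (text : String) (out : String) : Prop := out = remove_duplicate_sections_alt text
instance (text : String) (out : String) : Decidable (Spec_remove_duplicate_sections text out) := by unfold Spec_remove_duplicate_sections; infer_instance

-- ===== CLAIM (what is proved, stated in full; the proofs are below) =====
def Claim_equal_remove_duplicate_sections : Prop := ∀ (text : String), Dom_remove_duplicate_sections text → Spec_remove_duplicate_sections text (remove_duplicate_sections text)

-- ===== LEMMAS AND PROOFS =====

-- common reference function: the lines still to be appended, as an output suffix
def pvSpec (seen : PySem.Set String) (cur : List String) : List String → List String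
  | [] =>
    if cur.isEmpty then []
    else if pvCond seen (PySem.Str.join "\n" cur) then cur else []
  | x :: xs =>
    if pvKey x then pvSpec seen (cur ++ [x]) xs
    else
      if cur.isEmpty then x :: pvSpec seen [] xs
      else
        let p := PySem.Str.join "\n" cur
        if pvCond seen p then cur ++ x :: pvSpec (PySem.Set.add seen p) [] xs
        else x :: pvSpec seen [] xs

-- A's final flush, factored out
def pvAFinal (st : PySem.Set String × List String × List String) : List String :=
  if st.2.2.isEmpty then st.2.1
  else if pvCond st.1 (PySem.Str.join "\n" st.2.2) then st.2.1 ++ st.2.2 else st.2.1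

theorem pvA_main (lines : List String) :
    ∀ (seen : PySem.Set String) (r cur : List String),
    pvAFinal (lines.foldl pvAStep (seen, r, cur)) = r ++ pvSpec seen cur lines := by
  induction lines with
  | nil =>
    intro seen r cur
    simp only [List.foldl_nil, pvAFinal, pvSpec]
    split_ifs <;> simp_all
  | cons x xs ih =>
    intro seen r cur
    simp only [List.foldl_cons, pvSpec, pvKey]
    by_cases hb : (PySem.Str.strip x == "") = true
    · simp only [pvAStep, hb, if_true, Bool.not_true, Bool.false_eq_true, if_false]
      by_cases hc : cur.isEmpty
      · simp only [hc, if_true, ih, List.append_assoc, List.singleton_append]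
      · simp only [hc]
        by_cases hcond : pvCond seen (PySem.Str.join "\n" cur) = true
        · simp [hcond, ih, List.append_assoc]
        · simp [hcond, ih, List.append_assoc]
    · simp [pvAStep, eq_false_of_ne_true hb, ih]

theorem pvSpec_nonblank_run (g : List String) :
    ∀ (seen : PySem.Set String) (cur xs : List String), (∀ l ∈ g, pvKey l = true) →
    pvSpec seen cur (g ++ xs) = pvSpec seen (cur ++ g) xs := by
  induction g with
  | nil => intro seen cur xs _; simp
  | cons a g ih =>
    intro seen cur xs h
    have ha : pvKey a = true := h a (by simp)
    simp only [List.cons_append, pvSpec, ha, if_true]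
    rw [ih seen (cur ++ [a]) xs (fun l hl => h l (by simp [hl]))]
    simp

theorem pvDropWhile_head_false {α : Type} {p : α → Bool} {xs : List α} {y : α}
    {ys : List α} (h : xs.dropWhile p = y :: ys) : p y = false := by
  induction xs with
  | nil => simp at h
  | cons a as ih =>
    by_cases ha : p a = true
    · simp only [List.dropWhile_cons, ha, if_true] at h
      exact ih h
    · simp only [List.dropWhile_cons, ha, Bool.false_eq_true, if_false] at h
      injection h with h1 h2
      subst h1; simpa using ha

-- ---- B-side machinery ----

-- pass 1 as a pure recursion
def pvLabRec (pid : Int) (prev : Bool) : List String → List (Option Int)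
  | [] => []
  | l :: ls =>
    let cur := pvKey l
    let pid' := if cur && !prev then pid + 1 else pid
    (if cur then some pid' else none) :: pvLabRec pid' cur ls

-- the list of paragraph texts, by run peeling
def pvParasOf : List String → List String
  | [] => []
  | x :: xs =>
    if pvKey x then
      PySem.Str.join "\n" (x :: xs.takeWhile pvKey) :: pvParasOf (xs.dropWhile pvKey)
    else pvParasOf xs
termination_by l => l.length
decreasing_by
  · simp only [List.length_cons]
    exact Nat.lt_succ_of_le (List.length_dropWhile_le _ _)
  · simp

theorem pvLab_bridge (lines : List String) :
    ∀ (acc : List (Option Int)) (pid : Int) (prev : Bool),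
    (lines.foldl pvLab (acc, pid, prev)).1 = acc ++ pvLabRec pid prev lines := by
  induction lines with
  | nil => intro acc pid prev; simp [pvLabRec]
  | cons x xs ih =>
    intro acc pid prev
    simp only [List.foldl_cons, pvLab, pvLabRec, ih, List.append_assoc, List.singleton_append]

theorem pvLabRec_blank {x : String} (hx : pvKey x = false) (pid : Int) (prev : Bool)
    (xs : List String) : pvLabRec pid prev (x :: xs) = none :: pvLabRec pid false xs := by
  simp [pvLabRec, hx]

theorem pvLabRec_start {x : String} (hx : pvKey x = true) (pid : Int)
    (xs : List String) :
    pvLabRec pid false (x :: xs) = some (pid + 1) :: pvLabRec (pid + 1) true xs := by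
  simp [pvLabRec, hx]

theorem pvLabRec_run (t : List String) :
    ∀ (pid : Int) (rest : List String), (∀ l ∈ t, pvKey l = true) →
    pvLabRec pid true (t ++ rest) = t.map (fun _ => some pid) ++ pvLabRec pid true rest := by
  induction t with
  | nil => intro pid rest _; simp
  | cons a t ih =>
    intro pid rest h
    have ha : pvKey a = true := h a (by simp)
    simp [pvLabRec, ha, ih pid rest (fun l hl => h l (List.mem_cons_of_mem _ hl))]

theorem pvLabRec_prev (rest : List String) (pid : Int)
    (h : ∀ y ∈ rest.head?, pvKey y = false) :
    pvLabRec pid true rest = pvLabRec pid false rest := by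
  cases rest with
  | nil => rfl
  | cons y ys =>
    have hy : pvKey y = false := h y (by simp)
    rw [pvLabRec_blank hy, pvLabRec_blank hy]

-- String-level join facts (proved via the Chars definitions)
theorem pvJoin_singleton (s : String) : PySem.Str.join "\n" [s] = s := by
  apply String.toList_inj.mp
  simp [PySem.Str.toList_join, PySem.Chars.join_singleton]

theorem pvJoin_glue (a b : String) (r : List String) :
    PySem.Str.join "\n" ((a ++ "\n" ++ b) :: r) = PySem.Str.join "\n" (a :: b :: r) := by
  apply String.toList_inj.mp
  cases r with
  | nil =>
    simp [PySem.Str.toList_join, PySem.Chars.join_singleton, PySem.Chars.join_cons_cons]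
  | cons c r' =>
    simp [PySem.Str.toList_join, PySem.Chars.join_cons_cons, List.append_assoc]

theorem pvSetLast (xs : List String) (x v : String) :
    PySem.List.pySetD (xs ++ [x]) (-1) v = xs ++ [v] := by
  simp [PySem.List.pySetD, PySem.List.pySet?, PySem.List.pyIdx?]

theorem pvZipConst (l : List String) (c : Option Int) :
    l.zip (l.map fun _ => c) = l.map (fun x => (x, c)) := by
  have := @List.zip_map' _ _ _ id (fun _ => c) l
  simpa using this

-- pass 2 over one paragraph run
theorem pvPara_run (t : List String) :
    ∀ (P : List String) (s : String),
    List.foldl pvPara (P ++ [s]) (t.map (fun l => (l, some (P.length : Int)))) =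
      P ++ [PySem.Str.join "\n" (s :: t)] := by
  induction t with
  | nil => intro P s; simp [pvJoin_singleton]
  | cons l t ih =>
    intro P s
    have hne : ((P.length : Int) == PySem.List.len (P ++ [s])) = false := by
      simp [PySem.List.len_eq]
    simp only [List.map_cons, List.foldl_cons, pvPara, hne, Bool.false_eq_true, if_false,
      PySem.List.pyGetD_neg_one_append_singleton, pvSetLast]
    rw [ih P (s ++ "\n" ++ l), pvJoin_glue]

-- pass 2 computes the paragraph table
theorem pvPara_main : ∀ (n : Nat) (lines : List String), lines.length ≤ n →
    ∀ (P : List String),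
    List.foldl pvPara P (lines.zip (pvLabRec ((P.length : Int) - 1) false lines)) =
      P ++ pvParasOf lines := by
  intro n
  induction n with
  | zero =>
    intro lines h P
    have : lines = [] := List.eq_nil_of_length_eq_zero (Nat.le_zero.mp h)
    subst this; simp [pvLabRec, pvParasOf]
  | succ n ih =>
    intro lines h P
    match lines with
    | [] => simp [pvLabRec, pvParasOf]
    | x :: xs =>
      by_cases hk : pvKey x = true
      · set t := xs.takeWhile pvKey with ht
        set d := xs.dropWhile pvKey with hd
        have hsplit : t ++ d = xs := List.takeWhile_append_dropWhile
        have hgrp : ∀ l ∈ t, pvKey l = true := by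
          intro l hl; exact List.mem_takeWhile_imp (ht ▸ hl)
        have hdhead : ∀ y ∈ d.head?, pvKey y = false := by
          intro y hy
          cases hrest : d with
          | nil => simp [hrest] at hy
          | cons z zs =>
            simp only [hrest, List.head?_cons, Option.mem_some_iff] at hy
            subst hy
            exact pvDropWhile_head_false (hd ▸ hrest)
        have hlen : d.length ≤ n := by
          have hle := List.length_dropWhile_le pvKey xs
          rw [← hd] at hle
          simp only [List.length_cons] at h
          omega
        have hlab : pvLabRec ((P.length : Int) - 1) false (x :: xs) =
            some (P.length : Int) :: (t.map (fun _ => some (P.length : Int)) ++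
              pvLabRec (((P ++ [PySem.Str.join "\n" (x :: t)]).length : Int) - 1) false d) := by
          rw [pvLabRec_start hk, sub_add_cancel]
          conv_lhs => rw [← hsplit]
          rw [pvLabRec_run t _ _ hgrp, pvLabRec_prev d _ hdhead]
          have : (((P ++ [PySem.Str.join "\n" (x :: t)]).length : Int) - 1) = (P.length : Int) := by
            simp
          rw [this]
        rw [hlab]
        conv_lhs => rw [← hsplit]
        rw [List.zip_cons_cons, List.zip_append (by simp), List.foldl_cons, List.foldl_append]
        have hfirst : pvPara P (x, some (P.length : Int)) = P ++ [x] := by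
          simp [pvPara, PySem.List.len_eq]
        rw [hfirst, pvZipConst, pvPara_run t P x]
        rw [ih d hlen (P ++ [PySem.Str.join "\n" (x :: t)])]
        rw [pvParasOf]
        simp [hk, ← ht, ← hd]
      · have hk' : pvKey x = false := eq_false_of_ne_true hk
        rw [pvLabRec_blank hk']
        rw [List.zip_cons_cons, List.foldl_cons]
        have : pvPara P (x, none) = P := rfl
        rw [this]
        have hlen : xs.length ≤ n := by simp only [List.length_cons] at h; omega
        rw [ih xs hlen P, pvParasOf]
        simp [hk']

-- membership in the dropped set
theorem pvDropped_mem (pre rest : List String) (p : String) :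
    (PySem.Set.contains (pvDropped (pre ++ p :: rest)) ((pre.length : Int)) = true) ↔
      (100 ≤ PySem.Str.len p ∧ p ∈ pre) := by
  have hk : pre.length < (pre ++ p :: rest).length := by simp
  have hQk : (pre ++ p :: rest)[pre.length]'hk = p := by
    rw [List.getElem_append_right (le_refl _)]
    simp
  have htake : (pre ++ p :: rest).take pre.length = pre := List.take_left' rfl
  rw [pvDropped, PySem.Set.contains_iff, PySem.Set.mem_ofList]
  constructor
  · intro hmem
    obtain ⟨it, hit, hfst⟩ := List.mem_map.mp hmem
    obtain ⟨hin, hpred⟩ := List.mem_filter.mp hit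
    obtain ⟨j, hj, hjeq⟩ := (PySem.List.mem_enumerate_iff (pre ++ p :: rest) 0 it).mp hin
    subst hjeq
    simp only [zero_add] at hfst hpred
    have hjk : j = pre.length := by exact_mod_cast hfst
    subst hjk
    rw [PySem.List.slice_to_natCast] at hpred
    simp only [Bool.and_eq_true, decide_eq_true_eq] at hpred
    rw [hQk, htake] at hpred
    exact hpred
  · intro ⟨h1, h2⟩
    apply List.mem_map.mpr
    refine ⟨((pre.length : Int), p), ?_, rfl⟩
    apply List.mem_filter.mpr
    constructor
    · exact (PySem.List.mem_enumerate_iff _ 0 _).mpr ⟨pre.length, hk, by simp [hQk]⟩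
    · simp only [Bool.and_eq_true, decide_eq_true_eq]
      rw [PySem.List.slice_to_natCast, htake]
      exact ⟨h1, h2⟩

-- the constant-label block under the keep filter
theorem pvKeep_block (g : List String) (k : Int) (D : PySem.Set Int) :
    (((g.map (fun l => (l, some k))).filter (pvKeep D)).map (·.1)) =
      if PySem.Set.contains D k then [] else g := by
  induction g with
  | nil => simp
  | cons a g ih =>
    simp only [List.map_cons, List.filter_cons]
    cases hc : PySem.Set.contains D k with
    | false =>
      have hm : ¬ k ∈ D := by
        intro hmem
        have h2 := (PySem.Set.contains_iff D k).mpr hmem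
        rw [h2] at hc
        simp at hc
      simp [pvKeep, hm, ih]
    | true =>
      have hm : k ∈ D := (PySem.Set.contains_iff D k).mp hc
      simp [pvKeep, hm, ih]

theorem pvCond_of_not (pre : List String) (p : String)
    (h : ¬(100 ≤ PySem.Str.len p ∧ p ∈ pre)) :
    pvCond (PySem.Set.ofList pre) p = true := by
  rcases not_and_or.mp h with h1 | h2
  · have hlt : PySem.Str.len p < 100 := by omega
    rw [PySem.Str.len_eq] at hlt
    simp [pvCond]
    left
    exact_mod_cast hlt
  · simp [pvCond]
    exact Or.inr h2

theorem pvCond_of (pre : List String) (p : String)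
    (h : 100 ≤ PySem.Str.len p ∧ p ∈ pre) :
    pvCond (PySem.Set.ofList pre) p = false := by
  have h1 := h.1
  rw [PySem.Str.len_eq] at h1
  simp [pvCond, h.2]
  exact_mod_cast h1

-- pass 4 equals the reference suffix function
theorem pvB_main : ∀ (n : Nat) (lines : List String), lines.length ≤ n →
    ∀ (pre Q : List String), Q = pre ++ pvParasOf lines →
    (((lines.zip (pvLabRec ((pre.length : Int) - 1) false lines)).filter
        (pvKeep (pvDropped Q))).map (·.1)) =
      pvSpec (PySem.Set.ofList pre) [] lines := by
  intro n
  induction n with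
  | zero =>
    intro lines h pre Q hQ
    have : lines = [] := List.eq_nil_of_length_eq_zero (Nat.le_zero.mp h)
    subst this; simp [pvLabRec, pvSpec]
  | succ n ih =>
    intro lines h pre Q hQ
    match lines with
    | [] => simp [pvLabRec, pvSpec]
    | x :: xs =>
      by_cases hk : pvKey x = true
      · set t := xs.takeWhile pvKey with ht
        set d := xs.dropWhile pvKey with hd
        set p := PySem.Str.join "\n" (x :: t) with hp
        have hsplit : t ++ d = xs := List.takeWhile_append_dropWhile
        have hgrp : ∀ l ∈ t, pvKey l = true := by
          intro l hl; exact List.mem_takeWhile_imp (ht ▸ hl)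
        have hdhead : ∀ y ∈ d.head?, pvKey y = false := by
          intro y hy
          cases hrest : d with
          | nil => simp [hrest] at hy
          | cons z zs =>
            simp only [hrest, List.head?_cons, Option.mem_some_iff] at hy
            subst hy
            exact pvDropWhile_head_false (hd ▸ hrest)
        have hlen : d.length ≤ n := by
          have hle := List.length_dropWhile_le pvKey xs
          rw [← hd] at hle
          simp only [List.length_cons] at h
          omega
        have hQ' : Q = pre ++ p :: pvParasOf d := by
          rw [hQ, pvParasOf]
          simp [hk, ← ht, ← hd, ← hp]
        have hlab : pvLabRec ((pre.length : Int) - 1) false (x :: xs) =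
            some (pre.length : Int) :: (t.map (fun _ => some (pre.length : Int)) ++
              pvLabRec (((pre ++ [p]).length : Int) - 1) false d) := by
          rw [pvLabRec_start hk, sub_add_cancel]
          conv_lhs => rw [← hsplit]
          rw [pvLabRec_run t _ _ hgrp, pvLabRec_prev d _ hdhead]
          have : (((pre ++ [p]).length : Int) - 1) = (pre.length : Int) := by
            simp
          rw [this]
        have hspec : pvSpec (PySem.Set.ofList pre) [] (x :: xs) =
            pvSpec (PySem.Set.ofList pre) (x :: t) d := by
          have h1 : pvSpec (PySem.Set.ofList pre) [] (x :: xs) =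
              pvSpec (PySem.Set.ofList pre) [x] xs := by
            simp [pvSpec, hk]
          rw [h1]
          conv_lhs => rw [← hsplit]
          rw [pvSpec_nonblank_run t _ [x] d hgrp]
          simp
        rw [hlab]
        conv_lhs => rw [← hsplit]
        rw [List.zip_cons_cons, List.zip_append (by simp)]
        have hcons : ((x, some (pre.length : Int)) ::
            (t.zip (t.map (fun _ => some (pre.length : Int))) ++
              d.zip (pvLabRec (((pre ++ [p]).length : Int) - 1) false d))) =
            ((x :: t).map (fun l => (l, some (pre.length : Int))) ++
              d.zip (pvLabRec (((pre ++ [p]).length : Int) - 1) false d)) := by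
          rw [pvZipConst]; simp
        rw [hcons, List.filter_append, List.map_append, pvKeep_block]
        rw [hspec]
        cases hc : PySem.Set.contains (pvDropped Q) ((pre.length : Int)) with
        | true =>
          -- paragraph dropped: long duplicate
          have hc2 : PySem.Set.contains (pvDropped (pre ++ p :: pvParasOf d)) ((pre.length : Int)) = true := by
            rw [← hQ']; exact hc
          have hcond := (pvDropped_mem pre (pvParasOf d) p).mp hc2
          have hcondF : pvCond (PySem.Set.ofList pre) p = false := pvCond_of pre p hcond
          have hseen : PySem.Set.ofList (pre ++ [p]) = PySem.Set.ofList pre := by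
            rw [PySem.Set.ofList_append_singleton]
            exact PySem.Set.add_of_mem ((PySem.Set.mem_ofList pre p).mpr hcond.2)
          rw [if_pos rfl, List.nil_append]
          rw [ih d hlen (pre ++ [p]) Q (by rw [hQ']; simp), hseen]
          cases hrest : d with
          | nil => simp [pvSpec, hcondF, ← hp]
          | cons y ys =>
            have hy : pvKey y = false := pvDropWhile_head_false (hd ▸ hrest)
            simp [pvSpec, hy, hcondF, ← hp]
        | false =>
          -- paragraph kept
          have hcond : ¬(100 ≤ PySem.Str.len p ∧ p ∈ pre) := by
            intro hh
            have h2 := (pvDropped_mem pre (pvParasOf d) p).mpr hh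
            rw [← hQ'] at h2
            rw [h2] at hc
            simp at hc
          have hcondT : pvCond (PySem.Set.ofList pre) p = true := pvCond_of_not pre p hcond
          have hseen : PySem.Set.ofList (pre ++ [p]) = (PySem.Set.ofList pre).add p :=
            PySem.Set.ofList_append_singleton pre p
          rw [if_neg (by simp), ih d hlen (pre ++ [p]) Q (by rw [hQ']; simp), hseen]
          cases hrest : d with
          | nil => simp [pvSpec, hcondT, ← hp]
          | cons y ys =>
            have hy : pvKey y = false := pvDropWhile_head_false (hd ▸ hrest)
            simp [pvSpec, hy, hcondT, ← hp]
      · have hk' : pvKey x = false := eq_false_of_ne_true hk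
        rw [pvLabRec_blank hk', List.zip_cons_cons, List.filter_cons]
        have hkeep : pvKeep (pvDropped Q) (x, none) = true := rfl
        rw [hkeep]
        have hlen : xs.length ≤ n := by simp only [List.length_cons] at h; omega
        have hQ2 : Q = pre ++ pvParasOf xs := by
          rw [hQ, pvParasOf]; simp [hk']
        simp only [if_true, List.map_cons]
        rw [ih xs hlen pre Q hQ2]
        simp [pvSpec, hk']

-- ===== VERDICT (by name: the statement is the Claim_ definition above) =====
theorem pvAlt_char (lines : List String) :
    PySem.Str.join "\n" (((lines.zip ((lines.foldl pvLab ([], -1, false)).1)).filter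
        (pvKeep (pvDropped ((lines.zip ((lines.foldl pvLab ([], -1, false)).1)).foldl pvPara [])))).map (·.1)) =
      PySem.Str.join "\n" (pvSpec PySem.Set.empty [] lines) := by
  have hlab : (lines.foldl pvLab ([], -1, false)).1 =
      pvLabRec ((([] : List String).length : Int) - 1) false lines := by
    rw [pvLab_bridge]
    norm_num
  rw [hlab]
  have hparas : (lines.zip (pvLabRec ((([] : List String).length : Int) - 1) false lines)).foldl pvPara [] =
      pvParasOf lines := by
    have := pvPara_main lines.length lines le_rfl []
    simpa using this
  rw [hparas]
  have := pvB_main lines.length lines le_rfl [] (pvParasOf lines) (by simp)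
  rw [this]
  rfl

theorem remove_duplicate_sections_spec : Claim_equal_remove_duplicate_sections := by
  intro text _
  show remove_duplicate_sections text = remove_duplicate_sections_alt text
  unfold remove_duplicate_sections remove_duplicate_sections_alt
  rw [pvAlt_char]
  exact congrArg (PySem.Str.join "\n")
    (pvA_main ((PySem.Str.split? text "\n").getD []) PySem.Set.empty [] [])
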